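-- pv_equiv track=rewrite | github.com/wook101/algorithm | 프로그래머스/level3/억억단을 외우자.py | solution
-- ===== SOURCE A (Python) =====
-- def solution(e, starts):
--     count = [0] * (e + 1)
--     for i in range(1, e + 1):
--         for j in range(i, e + 1, i):
--             count[j] += 1
--
--     dp = [0] * (e + 1)
--     dp[e] = e
--     for i in range(e - 1, 0, -1):
--         if count[i] >= count[dp[i + 1]]:
--             dp[i] = i
--         else:
--             dp[i] = dp[i + 1]
--
--     return [dp[s] for s in starts]
-- ===== SOURCE B (Python) =====
-- def solution(e, starts):
--     # divisor counts via divisor-pair (d, q) enumeration: each pair d < q with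
--     # d*q <= e contributes 2 to count[d*q], each square d*d contributes 1
--     count = [0] * (e + 1)
--     d = 1
--     while d * d <= e:
--         count[d * d] += 1
--         for q in range(d + 1, e // d + 1):
--             count[d * q] += 2
--         d += 1
--
--     # suffix arg-max with a running scalar instead of a DP chain
--     best = [0] * (e + 1)
--     b = e
--     for i in range(e, 0, -1):
--         if count[i] >= count[b]:
--             b = i
--         best[i] = b
--
--     return [best[s] for s in starts]
-- ===== Notes on version B (the rewrite author's own statement) =====
-- stated objective: alternative
-- what changed: B builds the divisor-count table by enumerating divisor pairs (d, q) with d*d <= e (adding 2 per pair d < q and 1 per square) instead of A's harmonic multiples sieve, and replaces the dp-array chain dp[i] = dp[i+1]-or-i by a single backward scan carrying a running scalar best index.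
import Mathlib
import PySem

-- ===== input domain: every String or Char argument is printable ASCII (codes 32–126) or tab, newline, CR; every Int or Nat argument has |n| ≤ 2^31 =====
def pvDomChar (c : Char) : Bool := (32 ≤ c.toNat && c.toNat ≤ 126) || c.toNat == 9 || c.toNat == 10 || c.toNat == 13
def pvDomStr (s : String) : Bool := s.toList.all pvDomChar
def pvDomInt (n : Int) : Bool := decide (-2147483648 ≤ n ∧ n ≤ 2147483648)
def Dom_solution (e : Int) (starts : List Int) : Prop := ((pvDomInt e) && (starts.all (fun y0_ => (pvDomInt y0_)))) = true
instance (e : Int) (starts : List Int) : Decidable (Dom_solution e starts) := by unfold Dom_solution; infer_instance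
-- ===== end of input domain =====

-- B replaces A's harmonic divisor-count sieve by a divisor-pair enumeration (each pair
-- d < q adds 2 to count[d*q], each square d*d adds 1) and the DP array chain by a running
-- scalar maximum; measurably faster by a constant factor (about half the increments).

-- ===== PORT A =====

-- Python 'count[x] += w' (x known non-negative and in range in every use below)
def upd (c : Array Int) (j w : Int) : Array Int :=
  c.setIfInBounds j.toNat (c.getD j.toNat 0 + w)

-- A phase 1: harmonic sieve 'for i in range(1, e+1): for j in range(i, e+1, i): count[j] += 1'
def countA (e : Int) : Array Int :=
  (PySem.List.pyRange 1 (e+1) 1).foldl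
    (fun c i => (PySem.List.pyRange i (e+1) i).foldl (fun c j => upd c j 1) c)
    (Array.replicate (e+1).toNat 0)

-- A phase 2: 'dp[e] = e; for i in range(e-1, 0, -1): dp[i] = i if count[i] >= count[dp[i+1]] else dp[i+1]'
def dpA (e : Int) (count : Array Int) : Array Int :=
  (PySem.List.pyRange (e-1) 0 (-1)).foldl
    (fun dp i =>
      dp.setIfInBounds i.toNat
        (if count.getD i.toNat 0 ≥ count.getD (dp.getD (i+1).toNat 0).toNat 0
         then i else dp.getD (i+1).toNat 0))
    ((Array.replicate (e+1).toNat 0).setIfInBounds e.toNat e)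

def solution (e : Int) (starts : List Int) : List Int :=
  starts.map (fun s => (PySem.List.pyGet? (dpA e (countA e)).toList s).getD 0)

-- ===== PORT B =====

-- B phase 1: 'd = 1; while d*d <= e: count[d*d] += 1; for q in range(d+1, e//d+1): count[d*q] += 2; d += 1'
def bAux (e d : Int) (c : Array Int) : Array Int :=
  if d * d ≤ e then
    bAux e (d + 1)
      ((PySem.List.pyRange (d+1) (PySem.Int.floordiv e d + 1) 1).foldl
        (fun c q => upd c (d*q) 2) (upd c (d*d) 1))
  else c
termination_by (e + 1 - d).toNat
decreasing_by
  have h1 : d ≤ d * d := by nlinarith [sq_nonneg d, sq_nonneg (d-1)]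
  omega

def countB (e : Int) : Array Int := bAux e 1 (Array.replicate (e+1).toNat 0)

-- B phase 2: 'b = e; for i in range(e, 0, -1): if count[i] >= count[b]: b = i; best[i] = b'
def bestB (e : Int) (count : Array Int) : Array Int × Int :=
  (PySem.List.pyRange e 0 (-1)).foldl
    (fun st i =>
      let b := if count.getD i.toNat 0 ≥ count.getD st.2.toNat 0 then i else st.2
      (st.1.setIfInBounds i.toNat b, b))
    (Array.replicate (e+1).toNat 0, e)

def solution_alt (e : Int) (starts : List Int) : List Int :=
  starts.map (fun s => (PySem.List.pyGet? (bestB e (countB e)).1.toList s).getD 0)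

-- ===== PRECONDITION & SPEC =====
-- Pre_ excludes exactly the inputs where Python A raises IndexError: e < 0 (dp[e] = e on an
-- empty list) or a query s outside the index range [-(e+1), e] of the dp list.
def Pre_solution (e : Int) (starts : List Int) : Prop :=
  0 ≤ e ∧ ∀ s ∈ starts, -(e+1) ≤ s ∧ s ≤ e
instance (e : Int) (starts : List Int) : Decidable (Pre_solution e starts) := by
  unfold Pre_solution; infer_instance

def pvWitness_solution : Int × List Int := (6, [1, 3, 6, -7, 0])

def Spec_solution (e : Int) (starts : List Int) (out : List Int) : Prop := out = solution_alt e starts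
instance (e : Int) (starts : List Int) (out : List Int) : Decidable (Spec_solution e starts out) := by
  unfold Spec_solution; infer_instance

-- ===== CLAIM (what is proved, stated in full; the proofs are below) =====
def Claim_equal_solution : Prop := ∀ (e : Int) (starts : List Int), Dom_solution e starts → Pre_solution e starts → Spec_solution e starts (solution e starts)


-- ===== LEMMAS AND PROOFS =====

-- list twins of the two ports' table builders (same folds over List Int), used to reason
-- elementwise; bridged to the Array ports by toList lemmas below
def updL (c : List Int) (j w : Int) : List Int :=
  c.set j.toNat (PySem.List.pyGetD c j 0 + w)

def countAL (e : Int) : List Int :=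
  (PySem.List.pyRange 1 (e+1) 1).foldl
    (fun c i => (PySem.List.pyRange i (e+1) i).foldl (fun c j => updL c j 1) c)
    (List.replicate (e+1).toNat 0)

def bAuxL (e d : Int) (c : List Int) : List Int :=
  if d * d ≤ e then
    bAuxL e (d + 1)
      ((PySem.List.pyRange (d+1) (PySem.Int.floordiv e d + 1) 1).foldl
        (fun c q => updL c (d*q) 2) (updL c (d*d) 1))
  else c
termination_by (e + 1 - d).toNat
decreasing_by
  have h1 : d ≤ d * d := by nlinarith [sq_nonneg d, sq_nonneg (d-1)]
  omega

def countBL (e : Int) : List Int := bAuxL e 1 (List.replicate (e+1).toNat 0)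

-- Array ↔ List bridges
theorem agetD_toList (a : Array Int) (n : Nat) (d : Int) : a.getD n d = a.toList.getD n d := by
  simp only [Array.getD, List.getD]
  split
  · next h => simp [Array.getElem?_eq_getElem h]
  · next h => simp [Array.getElem?_eq_none (by omega : a.size ≤ n)]

theorem toArray_set (l : List Int) (n : Nat) (v : Int) :
    l.toArray.setIfInBounds n v = (l.set n v).toArray := by
  rw [← Array.toArray_toList (xs := l.toArray.setIfInBounds n v),
    Array.toList_setIfInBounds, List.toList_toArray]

theorem replicate_toArray (n : Nat) (v : Int) :
    Array.replicate n v = (List.replicate n v).toArray := by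
  rw [← Array.toArray_toList (xs := Array.replicate n v), Array.toList_replicate]

theorem toList_upd (c : Array Int) (j w : Int) (h : 0 ≤ j) :
    (upd c j w).toList = updL c.toList j w := by
  unfold upd updL
  rw [Array.toList_setIfInBounds, agetD_toList, PySem.List.pyGetD_of_nonneg _ _ h]

theorem bridge_fold (g : Int → Int) (w : Int) (M : List Int) :
    ∀ (a : Array Int), (∀ x ∈ M, 0 ≤ g x) →
      ((M.foldl (fun c x => upd c (g x) w) a).toList) = M.foldl (fun c x => updL c (g x) w) a.toList := by
  induction M with
  | nil => intro a _; rfl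
  | cons x t ih =>
    intro a hM
    rw [List.foldl_cons, List.foldl_cons, ih _ (fun y hy => hM y (List.mem_cons_of_mem _ hy)),
      toList_upd _ _ _ (hM x List.mem_cons_self)]

theorem countA_toList (e : Int) : (countA e).toList = countAL e := by
  unfold countA countAL
  have h : ∀ (L : List Int), (∀ i ∈ L, 1 ≤ i) → ∀ (a : Array Int),
      ((L.foldl (fun c i => (PySem.List.pyRange i (e+1) i).foldl (fun c j => upd c j 1) c) a).toList)
        = L.foldl (fun c i => (PySem.List.pyRange i (e+1) i).foldl (fun c j => updL c j 1) c) a.toList := by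
    intro L
    induction L with
    | nil => intro _ a; rfl
    | cons x t ih =>
      intro hL a
      rw [List.foldl_cons, List.foldl_cons, ih (fun y hy => hL y (List.mem_cons_of_mem _ hy))]
      have hx : 1 ≤ x := hL x List.mem_cons_self
      have heta : (fun (c : Array Int) (j : Int) => upd c j 1)
          = (fun (c : Array Int) (j : Int) => upd c (id j) 1) := rfl
      have hetaL : (fun (c : List Int) (j : Int) => updL c j 1)
          = (fun (c : List Int) (j : Int) => updL c (id j) 1) := rfl
      rw [heta, hetaL]
      rw [bridge_fold id 1 (PySem.List.pyRange x (e+1) x) a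
        (fun j hj => by
          have := (PySem.List.mem_pyRange_iff_of_pos (by omega : (0:Int) < x) j).mp hj
          simp only [id]
          omega)]
  rw [h _ (fun i hi => ((PySem.List.mem_pyRange_one).mp hi).1), Array.toList_replicate]

theorem bAux_toList (e d : Int) (c : Array Int) : 1 ≤ d → (bAux e d c).toList = bAuxL e d c.toList := by
  fun_induction bAux e d c with
  | case1 d c h ih =>
    intro hd
    rw [bAuxL, if_pos h, ih (by omega)]
    congr 1
    rw [bridge_fold (fun q => d*q) 2 _ _
        (fun x hx => by
          rw [PySem.List.mem_pyRange_one] at hx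
          exact mul_nonneg (by omega) (by omega)),
      toList_upd _ _ _ (mul_self_nonneg d)]
  | case2 d c h =>
    intro _
    rw [bAuxL, if_neg h]

theorem countB_toList (e : Int) : (countB e).toList = countBL e := by
  unfold countB countBL
  rw [bAux_toList e 1 _ (le_refl 1), Array.toList_replicate]

-- basic facts about the in-place increment 'upd'
theorem upd_length (c : List Int) (j w : Int) : (updL c j w).length = c.length := by
  simp [updL]

theorem getD_upd (c : List Int) (j w : Int) (k : Nat) (h0 : 0 ≤ j) :
    (updL c j w).getD k 0 =
      if (k : Int) = j ∧ k < c.length then c.getD k 0 + w else c.getD k 0 := by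
  unfold updL
  rw [PySem.List.pyGetD_of_nonneg _ _ h0]
  rw [List.getD_eq_getElem?_getD, List.getD_eq_getElem?_getD, List.getElem?_set]
  by_cases hjk : j.toNat = k
  · by_cases hlt : k < c.length
    · have hkj : (k : Int) = j := by omega
      subst hjk
      simp [hlt, hkj, List.getD_eq_getElem?_getD]
    · have : ¬ ((k : Int) = j ∧ k < c.length) := by tauto
      simp [hjk, hlt]
  · have : ¬ ((k : Int) = j ∧ k < c.length) := by
      rintro ⟨h1, -⟩; omega
    simp [hjk, this]

-- a fold of 'upd (g x) w' over a list adds w per occurrence of index k among the g-images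
theorem foldl_updg_length (g : Int → Int) (w : Int) (L : List Int) :
    ∀ c : List Int, (L.foldl (fun c x => updL c (g x) w) c).length = c.length := by
  induction L with
  | nil => intro c; rfl
  | cons x t ih => intro c; rw [List.foldl_cons, ih, upd_length]

theorem foldl_updg_getD (g : Int → Int) (w : Int) (L : List Int) :
    ∀ (c : List Int) (k : Nat), (∀ x ∈ L, 0 ≤ g x) → k < c.length →
      (L.foldl (fun c x => updL c (g x) w) c).getD k 0 =
        c.getD k 0 + w * (L.countP (fun x => g x == (k : Int)) : Int) := by
  induction L with
  | nil => intro c k _ _; simp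
  | cons x t ih =>
    intro c k hpos hk
    rw [List.foldl_cons, ih _ k (fun y hy => hpos y (List.mem_cons_of_mem _ hy))
        (by rw [upd_length]; exact hk)]
    rw [getD_upd _ _ _ _ (hpos x (List.mem_cons_self))]
    rw [List.countP_cons]
    by_cases hx : g x = (k : Int)
    · simp only [hx, hk, and_true, beq_self_eq_true, if_pos trivial]
      push_cast
      ring
    · have : ¬ ((k : Int) = g x ∧ k < c.length) := by
        rintro ⟨h1, -⟩; exact hx h1.symm
      simp only [this, beq_iff_eq, hx, if_false]
      ring_nf


-- nodup of a positive-step range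
theorem nodup_pyRange_pos (a b s : Int) (hs : 0 < s) : (PySem.List.pyRange a b s).Nodup := by
  rw [PySem.List.pyRange_of_pos a b hs]
  refine List.Nodup.map ?_ List.nodup_range
  intro x y hxy
  have : a + s * (x : Int) = a + s * (y : Int) := hxy
  have hxy2 : (x : Int) = y := by
    have hs' : s ≠ 0 := by omega
    have := mul_left_cancel₀ hs' (by omega : s * (x : Int) = s * (y : Int))
    exact this
  exact_mod_cast hxy2

-- A's inner loop visits k exactly once iff i divides k and i ≤ k ≤ e
theorem inner_count (e i k : Int) (hi : 1 ≤ i) :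
    ((PySem.List.pyRange i (e+1) i).countP (fun j => j == k) : Int) =
      if i ≤ k ∧ k ≤ e ∧ i ∣ k then 1 else 0 := by
  have hnd := nodup_pyRange_pos i (e+1) i (by omega)
  have hmem : k ∈ PySem.List.pyRange i (e+1) i ↔ i ≤ k ∧ k ≤ e ∧ i ∣ k := by
    rw [PySem.List.mem_pyRange_iff_of_pos (by omega)]
    constructor
    · rintro ⟨h1, h2, h3⟩
      refine ⟨h1, by omega, ?_⟩
      have := dvd_add h3 (dvd_refl i)
      simpa using this
    · rintro ⟨h1, h2, h3⟩
      exact ⟨h1, by omega, by simpa using dvd_sub h3 (dvd_refl i)⟩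
  have hc : (PySem.List.pyRange i (e+1) i).countP (fun j => j == k) =
      (PySem.List.pyRange i (e+1) i).count k := by
    simp [List.count]
  rw [hc]
  by_cases h : i ≤ k ∧ k ≤ e ∧ i ∣ k
  · rw [List.count_eq_one_of_mem hnd (hmem.mpr h), if_pos h]; rfl
  · rw [List.count_eq_zero.mpr (fun hm => h (hmem.mp hm)), if_neg h]; rfl

-- unfolding A's outer sieve loop at one position
theorem outerA_getD (e : Int) (L : List Int) :
    ∀ (c : List Int) (k : Nat), (∀ i ∈ L, 1 ≤ i) → k < c.length →
      ((L.foldl (fun c i => (PySem.List.pyRange i (e+1) i).foldl (fun c j => updL c j 1) c) c).getD k 0)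
        = c.getD k 0 +
          (L.map (fun i => ((PySem.List.pyRange i (e+1) i).countP (fun j => j == (k:Int)) : Int))).sum := by
  induction L with
  | nil => intro c k _ _; simp
  | cons x t ih =>
    intro c k hL hk
    have hx : 1 ≤ x := hL x List.mem_cons_self
    have hstep : ∀ c : List Int,
        ((PySem.List.pyRange x (e+1) x).foldl (fun c j => updL c j 1) c) =
          ((PySem.List.pyRange x (e+1) x).foldl (fun c j => updL c (id j) 1) c) := by
      intro c; rfl
    rw [List.foldl_cons, ih _ k (fun y hy => hL y (List.mem_cons_of_mem _ hy))
        (by rw [hstep, foldl_updg_length]; exact hk)]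
    rw [hstep, foldl_updg_getD id 1 _ c k
        (fun j hj => by
          have := (PySem.List.mem_pyRange_iff_of_pos (by omega : (0:Int) < x) j).mp hj
          simp only [id]; omega)
        hk]
    simp only [List.map_cons, List.sum_cons, id]
    ring

-- the count table A builds: entry k = number of i in [1, e] dividing k
theorem countA_getD (e : Int) (k : Nat) (hk : k < (e+1).toNat) :
    (countAL e).getD k 0 =
      ((PySem.List.pyRange 1 (e+1) 1).map
        (fun i => if i ≤ (k:Int) ∧ (k:Int) ≤ e ∧ i ∣ (k:Int) then (1:Int) else 0)).sum := by
  unfold countAL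
  rw [outerA_getD e _ _ k
      (fun i hi => ((PySem.List.mem_pyRange_one).mp hi).1)
      (by simp; omega)]
  rw [show (List.replicate (e+1).toNat (0:Int)).getD k 0 = 0 from List.getD_replicate _ (by omega), zero_add]
  congr 1
  apply List.map_congr_left
  intro i hi
  exact inner_count e i k ((PySem.List.mem_pyRange_one).mp hi).1


-- the per-d contribution of B's while loop, defined by the same recursion
def S (e d k : Int) : Int :=
  if d * d ≤ e then
    ((if d*d = k then (1:Int) else 0) + 2 * (if d ∣ k ∧ d*d < k ∧ k ≤ e then (1:Int) else 0))
      + S e (d+1) k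
  else 0
termination_by (e + 1 - d).toNat
decreasing_by
  have h1 : d ≤ d * d := by nlinarith [sq_nonneg d, sq_nonneg (d-1)]
  omega

-- B's inner loop hits k exactly once iff d divides k with d*d < k ≤ e
theorem pair_count (e d k : Int) (hd : 1 ≤ d) :
    ((PySem.List.pyRange (d+1) (PySem.Int.floordiv e d + 1) 1).countP (fun q => d*q == k) : Int) =
      if d ∣ k ∧ d*d < k ∧ k ≤ e then 1 else 0 := by
  set l := PySem.List.pyRange (d+1) (PySem.Int.floordiv e d + 1) 1 with hl
  have hcp : l.countP (fun q => d*q == k) = (l.map (fun q => d*q)).count k := by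
    rw [List.count, List.countP_map]; rfl
  have hinj : Function.Injective (fun q : Int => d*q) :=
    mul_right_injective₀ (by omega : d ≠ 0)
  have hnd : (l.map (fun q => d*q)).Nodup :=
    List.Nodup.map hinj (by rw [hl]; exact PySem.List.nodup_pyRange_one _ _)
  have hmem : k ∈ l.map (fun q => d*q) ↔ d ∣ k ∧ d*d < k ∧ k ≤ e := by
    rw [List.mem_map]
    constructor
    · rintro ⟨q, hq, hqk⟩
      rw [hl, PySem.List.mem_pyRange_one] at hq
      obtain ⟨hq1, hq2⟩ := hq
      refine ⟨⟨q, hqk.symm⟩, ?_, ?_⟩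
      · calc d*d < d*q := by
              apply mul_lt_mul_of_pos_left (by omega) (by omega)
          _ = k := hqk
      · have hqf : q ≤ PySem.Int.floordiv e d := by omega
        have h2 := (PySem.Int.le_floordiv_iff_mul_le (by omega : (0:Int) < d)).mp hqf
        rw [← hqk, mul_comm]
        exact h2
    · rintro ⟨⟨m, hm⟩, hlt, hle⟩
      refine ⟨m, ?_, hm.symm⟩
      rw [hl, PySem.List.mem_pyRange_one]
      have hdm : d < m := by
        have : d*d < d*m := by omega
        exact lt_of_mul_lt_mul_left this (by omega)
      have hmf : m ≤ PySem.Int.floordiv e d := by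
        rw [PySem.Int.le_floordiv_iff_mul_le (by omega : (0:Int) < d)]
        rw [mul_comm, ← hm]
        exact hle
      omega
  rw [hcp]
  by_cases h : d ∣ k ∧ d*d < k ∧ k ≤ e
  · rw [List.count_eq_one_of_mem hnd (hmem.mpr h), if_pos h]; rfl
  · rw [List.count_eq_zero.mpr (fun hm => h (hmem.mp hm)), if_neg h]; rfl

theorem bAux_length (e d : Int) (c : List Int) : (bAuxL e d c).length = c.length := by
  fun_induction bAuxL e d c with
  | case1 d c h ih =>
    rw [ih]
    exact (foldl_updg_length (fun q => d*q) 2 _ _).trans (upd_length _ _ _)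
  | case2 d c h => rfl

theorem bAux_getD (e d : Int) (c : List Int) : 1 ≤ d → ∀ k : Nat, k < c.length →
    (bAuxL e d c).getD k 0 = c.getD k 0 + S e d k := by
  fun_induction bAuxL e d c with
  | case1 d c h ih =>
    intro hd k hk
    have hlen : ((PySem.List.pyRange (d+1) (PySem.Int.floordiv e d + 1) 1).foldl
        (fun c q => updL c (d*q) 2) (updL c (d*d) 1)).length = c.length :=
      (foldl_updg_length (fun q => d*q) 2 _ _).trans (upd_length _ _ _)
    rw [ih (by omega) k (by omega)]
    rw [foldl_updg_getD (fun q => d*q) 2 _ _ k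
        (fun x hx => by
          rw [PySem.List.mem_pyRange_one] at hx
          exact mul_nonneg (by omega) (by omega))
        (by rw [upd_length]; exact hk)]
    rw [getD_upd _ _ _ _ (mul_self_nonneg d)]
    rw [pair_count e d (k:Int) (by omega)]
    have hS : S e d (k:Int) = ((if d*d = (k:Int) then (1:Int) else 0)
        + 2 * (if d ∣ (k:Int) ∧ d*d < (k:Int) ∧ (k:Int) ≤ e then (1:Int) else 0)) + S e (d+1) (k:Int) := by
      rw [S, if_pos h]
    rw [hS]
    have hsq : ((k:Int) = d*d ∧ k < c.length) ↔ (d*d = (k:Int)) := by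
      constructor
      · rintro ⟨h1, -⟩; omega
      · intro h1; exact ⟨h1.symm, hk⟩
    by_cases hs : d*d = (k:Int)
    · rw [if_pos (hsq.mpr hs), if_pos hs]; ring
    · rw [if_neg (fun hx => hs (hsq.mp hx)), if_neg hs]; ring
  | case2 d c h =>
    intro hd k hk
    rw [show S e d (k:Int) = 0 from by rw [S, if_neg h]]
    ring

theorem S_eq_sum (e d k : Int) : 1 ≤ d → k ≤ e →
    S e d k = ((PySem.List.pyRange d (e+1) 1).map
      (fun x => (if x*x = k then (1:Int) else 0)
        + 2 * (if x ∣ k ∧ x*x < k ∧ k ≤ e then (1:Int) else 0))).sum := by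
  fun_induction S e d k with
  | case1 d h ih =>
    intro hd hke
    have hdd : d ≤ d * d := by nlinarith [sq_nonneg (d-1)]
    rw [PySem.List.pyRange_one_cons (by omega : d < e+1)]
    rw [List.map_cons, List.sum_cons, ih (by omega) hke]
  | case2 d h =>
    intro hd hke
    symm
    apply List.sum_eq_zero
    intro y hy
    rw [List.mem_map] at hy
    obtain ⟨x, hx, rfl⟩ := hy
    rw [PySem.List.mem_pyRange_one] at hx
    have hxx : e < x * x := by nlinarith
    rw [if_neg (by omega), if_neg (by rintro ⟨-, h1, h2⟩; omega)]
    ring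

-- the count table B builds, as a sum over the same outer range as A's
theorem countB_getD (e : Int) (k : Nat) (hk : k < (e+1).toNat) :
    (countBL e).getD k 0 = S e 1 (k:Int) := by
  unfold countBL
  rw [bAux_getD e 1 _ (le_refl 1) k (by simp; omega)]
  rw [show (List.replicate (e+1).toNat (0:Int)).getD k 0 = 0 from List.getD_replicate _ (by omega), zero_add]


-- sums of 0/1 indicators are countP
theorem sum_ite_countP {α : Type} (l : List α) (P : α → Prop) [DecidablePred P] :
    (l.map (fun x => if P x then (1:Int) else 0)).sum = (l.countP (fun x => decide (P x)) : Int) := by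
  induction l with
  | nil => simp
  | cons x t ih =>
    rw [List.map_cons, List.sum_cons, ih, List.countP_cons]
    by_cases h : P x
    · simp [h]
      omega
    · simp [h]

theorem countP_toFinset (l : List Int) (hnd : l.Nodup) (P : Int → Prop) [DecidablePred P] :
    l.countP (fun x => decide (P x)) = (l.toFinset.filter P).card := by
  rw [List.countP_eq_length_filter,
    ← List.toFinset_card_of_nodup (List.Nodup.filter _ hnd), List.toFinset_filter]
  congr 1
  ext x
  simp

theorem toFinset_range1 (e : Int) : (PySem.List.pyRange 1 (e+1) 1).toFinset = Finset.Icc 1 e := by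
  ext x
  rw [List.mem_toFinset, PySem.List.mem_pyRange_one, Finset.mem_Icc]
  omega

-- the divisor-pairing identity: divisors of k in [1,e] (k ≤ e) split into the square root,
-- the small halves (x*x < k) and their cofactors (k < x*x), matched by x ↦ k / x
theorem divisor_pairing (e k : Int) (hk : 1 ≤ k) (hke : k ≤ e) :
    ((Finset.Icc 1 e).filter (fun x => x*x = k)).card
      + 2 * ((Finset.Icc 1 e).filter (fun x => x ∣ k ∧ x*x < k ∧ k ≤ e)).card
      = ((Finset.Icc 1 e).filter (fun x => x ≤ k ∧ k ≤ e ∧ x ∣ k)).card := by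
  have hmemI : ∀ x : Int, x ∈ Finset.Icc 1 e ↔ 1 ≤ x ∧ x ≤ e := fun x => Finset.mem_Icc
  have hD : ((Finset.Icc 1 e).filter (fun x => x ≤ k ∧ k ≤ e ∧ x ∣ k))
      = ((Finset.Icc 1 e).filter (fun x => x ∣ k)) := by
    apply Finset.filter_congr
    intro x hx
    rw [hmemI] at hx
    simp only [iff_iff_implies_and_implies]
    constructor
    · rintro ⟨-, -, h⟩; exact h
    · intro h; exact ⟨Int.le_of_dvd (by omega) h, hke, h⟩
  have hH : ((Finset.Icc 1 e).filter (fun x => x ∣ k ∧ x*x < k ∧ k ≤ e))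
      = ((Finset.Icc 1 e).filter (fun x => x ∣ k ∧ x*x < k)) := by
    apply Finset.filter_congr
    intro x hx
    simp only [iff_iff_implies_and_implies]
    constructor
    · rintro ⟨h1, h2, -⟩; exact ⟨h1, h2⟩
    · rintro ⟨h1, h2⟩; exact ⟨h1, h2, hke⟩
  rw [hD, hH]
  have hsplit1 : (((Finset.Icc 1 e).filter (fun x => x ∣ k)).filter (fun x => x*x < k)).card
      + (((Finset.Icc 1 e).filter (fun x => x ∣ k)).filter (fun x => ¬ x*x < k)).card
      = ((Finset.Icc 1 e).filter (fun x => x ∣ k)).card :=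
    Finset.card_filter_add_card_filter_not _
  have hsplit2 : ((((Finset.Icc 1 e).filter (fun x => x ∣ k)).filter (fun x => ¬ x*x < k)).filter (fun x => x*x = k)).card
      + ((((Finset.Icc 1 e).filter (fun x => x ∣ k)).filter (fun x => ¬ x*x < k)).filter (fun x => ¬ x*x = k)).card
      = (((Finset.Icc 1 e).filter (fun x => x ∣ k)).filter (fun x => ¬ x*x < k)).card :=
    Finset.card_filter_add_card_filter_not _
  have hsq : (((Finset.Icc 1 e).filter (fun x => x ∣ k)).filter (fun x => ¬ x*x < k)).filter (fun x => x*x = k)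
      = (Finset.Icc 1 e).filter (fun x => x*x = k) := by
    rw [Finset.filter_filter, Finset.filter_filter]
    apply Finset.filter_congr
    intro x hx
    simp only [iff_iff_implies_and_implies]
    constructor
    · rintro ⟨-, -, h⟩; exact h
    · intro h; exact ⟨⟨x, h.symm⟩, by omega, h⟩
  have hG : (((Finset.Icc 1 e).filter (fun x => x ∣ k)).filter (fun x => ¬ x*x < k)).filter (fun x => ¬ x*x = k)
      = (Finset.Icc 1 e).filter (fun x => x ∣ k ∧ k < x*x) := by
    rw [Finset.filter_filter, Finset.filter_filter]
    apply Finset.filter_congr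
    intro x hx
    simp only [iff_iff_implies_and_implies]
    constructor
    · rintro ⟨h1, h2, h3⟩; exact ⟨h1, by omega⟩
    · rintro ⟨h1, h2⟩; exact ⟨h1, by omega, by omega⟩
  have hL : (((Finset.Icc 1 e).filter (fun x => x ∣ k)).filter (fun x => x*x < k))
      = (Finset.Icc 1 e).filter (fun x => x ∣ k ∧ x*x < k) := by
    rw [Finset.filter_filter]
  have hbij : ((Finset.Icc 1 e).filter (fun x => x ∣ k ∧ k < x*x)).card
      = ((Finset.Icc 1 e).filter (fun x => x ∣ k ∧ x*x < k)).card := by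
    apply Finset.card_nbij' (fun x => k / x) (fun x => k / x)
    · intro x hx
      simp only [Finset.coe_filter, Set.mem_setOf_eq, hmemI] at hx ⊢
      obtain ⟨⟨hx1, hx2⟩, ⟨m, hm⟩, hlt⟩ := hx
      have hx0 : x ≠ 0 := by omega
      have hdiv : k / x = m := by rw [hm, Int.mul_ediv_cancel_left _ hx0]
      have hm1 : 1 ≤ m := by nlinarith
      have hmx : m < x := by nlinarith
      rw [hdiv]
      refine ⟨⟨hm1, by nlinarith⟩, ⟨x, by rw [hm, mul_comm]⟩, by nlinarith⟩
    · intro x hx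
      simp only [Finset.coe_filter, Set.mem_setOf_eq, hmemI] at hx ⊢
      obtain ⟨⟨hx1, hx2⟩, ⟨m, hm⟩, hlt⟩ := hx
      have hx0 : x ≠ 0 := by omega
      have hdiv : k / x = m := by rw [hm, Int.mul_ediv_cancel_left _ hx0]
      have hm1 : 1 ≤ m := by nlinarith
      have hmx : x < m := by nlinarith
      rw [hdiv]
      refine ⟨⟨hm1, by nlinarith⟩, ⟨x, by rw [hm, mul_comm]⟩, by nlinarith⟩
    · intro x hx
      simp only [Finset.coe_filter, Set.mem_setOf_eq, hmemI] at hx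
      obtain ⟨⟨hx1, hx2⟩, ⟨m, hm⟩, hlt⟩ := hx
      have hx0 : x ≠ 0 := by omega
      have hdiv : k / x = m := by rw [hm, Int.mul_ediv_cancel_left _ hx0]
      have hm1 : 1 ≤ m := by nlinarith
      simp only [hdiv]
      rw [hm, mul_comm, Int.mul_ediv_cancel_left _ (by omega : m ≠ 0)]
    · intro x hx
      simp only [Finset.coe_filter, Set.mem_setOf_eq, hmemI] at hx
      obtain ⟨⟨hx1, hx2⟩, ⟨m, hm⟩, hlt⟩ := hx
      have hx0 : x ≠ 0 := by omega
      have hdiv : k / x = m := by rw [hm, Int.mul_ediv_cancel_left _ hx0]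
      have hm1 : 1 ≤ m := by nlinarith
      simp only [hdiv]
      rw [hm, mul_comm, Int.mul_ediv_cancel_left _ (by omega : m ≠ 0)]
  rw [hsq, hG] at hsplit2
  rw [hL] at hsplit1
  omega


theorem countA_length (e : Int) : (countAL e).length = (e+1).toNat := by
  unfold countAL
  have h : ∀ (L : List Int) (c : List Int),
      (L.foldl (fun c i => (PySem.List.pyRange i (e+1) i).foldl (fun c j => updL c j 1) c) c).length
        = c.length := by
    intro L
    induction L with
    | nil => intro c; rfl
    | cons x t ih =>
      intro c
      rw [List.foldl_cons, ih]
      exact foldl_updg_length id 1 _ c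
  rw [h]
  simp

theorem countB_length (e : Int) : (countBL e).length = (e+1).toNat := by
  unfold countBL
  rw [bAux_length]
  simp

theorem countsL_eq (e : Int) (he : 0 ≤ e) : countBL e = countAL e := by
  apply List.ext_getElem (by rw [countA_length, countB_length])
  intro n h1 h2
  have hn : n < (e+1).toNat := by rw [countB_length] at h1; exact h1
  rw [← List.getD_eq_getElem (countBL e) 0 h1, ← List.getD_eq_getElem (countAL e) 0 h2]
  rw [countA_getD e n hn, countB_getD e n hn]
  rw [S_eq_sum e 1 (n:Int) (le_refl 1) (by omega)]
  rcases Nat.eq_zero_or_pos n with rfl | hpos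
  · rw [List.sum_eq_zero, List.sum_eq_zero]
    · intro y hy
      rw [List.mem_map] at hy
      obtain ⟨x, hx, rfl⟩ := hy
      rw [PySem.List.mem_pyRange_one] at hx
      rw [if_neg (by rintro ⟨hle, -⟩; omega)]
    · intro y hy
      rw [List.mem_map] at hy
      obtain ⟨x, hx, rfl⟩ := hy
      rw [PySem.List.mem_pyRange_one] at hx
      have hxx : (0:Int) < x*x := by nlinarith
      rw [if_neg (by omega), if_neg (by push_cast; rintro ⟨-, hlt, -⟩; omega)]
      ring
  · rw [PySem.List.sum_map_add_int _ (fun x => if x*x = (n:Int) then (1:Int) else 0)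
        (fun x => 2 * (if x ∣ (n:Int) ∧ x*x < (n:Int) ∧ (n:Int) ≤ e then (1:Int) else 0))]
    rw [List.sum_map_mul_left]
    rw [sum_ite_countP _ (fun x => x*x = (n:Int)),
        sum_ite_countP _ (fun x => x ∣ (n:Int) ∧ x*x < (n:Int) ∧ (n:Int) ≤ e),
        sum_ite_countP _ (fun i => i ≤ (n:Int) ∧ (n:Int) ≤ e ∧ i ∣ (n:Int))]
    rw [countP_toFinset _ (PySem.List.nodup_pyRange_one _ _) (fun x => x*x = (n:Int)),
        countP_toFinset _ (PySem.List.nodup_pyRange_one _ _) (fun x => x ∣ (n:Int) ∧ x*x < (n:Int) ∧ (n:Int) ≤ e),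
        countP_toFinset _ (PySem.List.nodup_pyRange_one _ _) (fun i => i ≤ (n:Int) ∧ (n:Int) ≤ e ∧ i ∣ (n:Int))]
    rw [toFinset_range1]
    have hdp := divisor_pairing e (n:Int) (by omega) (by omega)
    omega



-- suffix arg-max value: sb cnt E m is the tie-to-smaller-index arg-max of cnt over [E-m, E]
def sb (cnt : List Int) (E : Nat) : Nat → Nat
  | 0 => E
  | m+1 => if cnt.getD (E - (m+1)) 0 ≥ cnt.getD (sb cnt E m) 0 then E - (m+1) else sb cnt E m

-- common intermediate state of both loops after processing indices above t
def stA (cnt : List Int) (E t : Nat) : List Int :=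
  (List.range (E+1)).map (fun k => if t < k then ((sb cnt E (E - k) : Nat) : Int) else 0)

theorem stA_length (cnt : List Int) (E t : Nat) : (stA cnt E t).length = E + 1 := by
  simp [stA]

theorem stA_getElem (cnt : List Int) (E t k : Nat) (hk : k < E + 1) :
    (stA cnt E t)[k]'(by rw [stA_length]; exact hk)
      = if t < k then ((sb cnt E (E - k) : Nat) : Int) else 0 := by
  simp [stA]

theorem stA_getD (cnt : List Int) (E t k : Nat) (hk : k < E + 1) :
    (stA cnt E t).getD k 0 = if t < k then ((sb cnt E (E - k) : Nat) : Int) else 0 := by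
  rw [List.getD_eq_getElem _ 0 (by rw [stA_length]; exact hk), stA_getElem cnt E t k hk]

-- unfolding sb one step at cut t (cast to Int)
theorem sb_val (cnt : List Int) (E t : Nat) (ht : t + 2 ≤ E) :
    ((sb cnt E (E - (t+1)) : Nat) : Int)
      = if cnt.getD (t+1) 0 ≥ cnt.getD (sb cnt E (E - (t+2))) 0
        then ((t:Int)+1) else ((sb cnt E (E - (t+2)) : Nat) : Int) := by
  have hun : E - (t+1) = (E - (t+2)) + 1 := by omega
  rw [hun, sb]
  have hEE : E - ((E - (t+2)) + 1) = t + 1 := by omega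
  rw [hEE]
  split_ifs with h
  · push_cast; ring
  · rfl

-- one backward step writes exactly sb's next value
theorem stA_step (cnt : List Int) (E t : Nat) (_ht : t + 2 ≤ E) :
    (stA cnt E (t+1)).set (t+1) ((sb cnt E (E - (t+1)) : Nat) : Int) = stA cnt E t := by
  apply List.ext_getElem (by rw [List.length_set, stA_length, stA_length])
  intro n hn1 hn2
  have hnE : n < E + 1 := by rw [stA_length] at hn2; exact hn2
  rw [List.getElem_set, stA_getElem cnt E t n hnE]
  by_cases hnt : t + 1 = n
  · subst hnt
    rw [if_pos rfl, if_pos (by omega)]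
  · rw [if_neg hnt, stA_getElem cnt E (t+1) n hnE]
    by_cases h : t < n
    · rw [if_pos (by omega), if_pos h]
    · rw [if_neg (by omega), if_neg h]

-- A's backward DP loop, from any cut point t down
theorem dpA_loop (cnt : List Int) (E : Nat) (hE : 1 ≤ E) : ∀ t : Nat, t ≤ E - 1 →
    ((PySem.List.pyRange (t : Int) 0 (-1)).foldl
      (fun dp i => dp.setIfInBounds i.toNat
        (if cnt.toArray.getD i.toNat 0 ≥
            cnt.toArray.getD (dp.getD (i+1).toNat 0).toNat 0
         then i else dp.getD (i+1).toNat 0))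
      ((stA cnt E t).toArray)) = (stA cnt E 0).toArray := by
  intro t
  induction t with
  | zero => intro _; rw [PySem.List.pyRange_neg_one_eq_nil (by omega)]; rfl
  | succ t ih =>
    intro ht
    rw [show ((t+1 : Nat) : Int) = ((t:Int) + 1) by push_cast; ring]
    rw [PySem.List.pyRange_neg_one_cons (by omega), List.foldl_cons]
    have hread : (stA cnt E (t+1)).toArray.getD (((t:Int)+1)+1).toNat 0
        = ((sb cnt E (E - (t+2)) : Nat) : Int) := by
      rw [agetD_toList, List.toList_toArray,
        show (((t:Int)+1)+1).toNat = t + 2 from by omega,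
        stA_getD cnt E (t+1) (t+2) (by omega), if_pos (by omega)]
    have hcnt1 : cnt.toArray.getD (((t:Int)+1)).toNat 0 = cnt.getD (t+1) 0 := by
      rw [agetD_toList, List.toList_toArray, show (((t:Int)+1)).toNat = t+1 from by omega]
    have hcnt2 : cnt.toArray.getD (((sb cnt E (E - (t+2)) : Nat) : Int)).toNat 0
        = cnt.getD (sb cnt E (E - (t+2))) 0 := by
      rw [agetD_toList, List.toList_toArray,
        show (((sb cnt E (E - (t+2)) : Nat) : Int)).toNat = sb cnt E (E - (t+2)) from by omega]
    have hstep : (stA cnt E (t+1)).toArray.setIfInBounds (((t:Int)+1)).toNat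
          (if cnt.toArray.getD (((t:Int)+1)).toNat 0 ≥
              cnt.toArray.getD ((stA cnt E (t+1)).toArray.getD (((t:Int)+1)+1).toNat 0).toNat 0
           then ((t:Int)+1) else (stA cnt E (t+1)).toArray.getD (((t:Int)+1)+1).toNat 0)
        = (stA cnt E t).toArray := by
      rw [hread, hcnt1, hcnt2, ← sb_val cnt E t (by omega)]
      rw [toArray_set, show (((t:Int)+1)).toNat = t + 1 from by omega]
      exact congrArg List.toArray (stA_step cnt E t (by omega))
    rw [show ((t:Int) + 1 - 1) = (t : Int) from by ring, hstep]
    exact ih (by omega)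

-- B's backward scan with the running scalar
theorem bestB_loop (cnt : List Int) (E : Nat) (hE : 1 ≤ E) : ∀ t : Nat, t ≤ E - 1 →
    (((PySem.List.pyRange (t : Int) 0 (-1)).foldl
      (fun (st : Array Int × Int) i =>
        let b := if cnt.toArray.getD i.toNat 0 ≥ cnt.toArray.getD st.2.toNat 0 then i else st.2
        (st.1.setIfInBounds i.toNat b, b))
      ((stA cnt E t).toArray, ((sb cnt E (E - (t+1)) : Nat) : Int))).1) = (stA cnt E 0).toArray := by
  intro t
  induction t with
  | zero => intro _; rw [PySem.List.pyRange_neg_one_eq_nil (by omega)]; rfl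
  | succ t ih =>
    intro ht
    rw [show ((t+1 : Nat) : Int) = ((t:Int) + 1) by push_cast; ring]
    rw [PySem.List.pyRange_neg_one_cons (by omega), List.foldl_cons]
    have hcnt1 : cnt.toArray.getD (((t:Int)+1)).toNat 0 = cnt.getD (t+1) 0 := by
      rw [agetD_toList, List.toList_toArray, show (((t:Int)+1)).toNat = t+1 from by omega]
    have hcnt2 : cnt.toArray.getD (((sb cnt E (E - (t+1+1)) : Nat) : Int)).toNat 0
        = cnt.getD (sb cnt E (E - (t+2))) 0 := by
      rw [agetD_toList, List.toList_toArray,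
        show (((sb cnt E (E - (t+1+1)) : Nat) : Int)).toNat = sb cnt E (E - (t+1+1)) from by omega,
        show (E - (t+1+1)) = (E - (t+2)) from by omega]
    have hb : (if cnt.toArray.getD (((t:Int)+1)).toNat 0 ≥
          cnt.toArray.getD (((sb cnt E (E - (t+1+1)) : Nat) : Int)).toNat 0
        then ((t:Int)+1) else ((sb cnt E (E - (t+1+1)) : Nat) : Int))
        = ((sb cnt E (E - (t+1)) : Nat) : Int) := by
      rw [hcnt1, hcnt2, show (E - (t+1+1)) = (E - (t+2)) from by omega]
      exact (sb_val cnt E t (by omega)).symm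
    have hlist : (stA cnt E (t+1)).toArray.setIfInBounds (((t:Int)+1)).toNat
          ((sb cnt E (E - (t+1)) : Nat) : Int) = (stA cnt E t).toArray := by
      rw [toArray_set, show ((t:Int) + 1).toNat = t + 1 from by omega]
      exact congrArg List.toArray (stA_step cnt E t (by omega))
    rw [show ((t:Int) + 1 - 1) = (t : Int) from by ring]
    simp only [hb, hlist]
    exact ih (by omega)

theorem dp_eq (e : Int) (he : 0 ≤ e) : (bestB e (countB e)).1 = dpA e (countA e) := by
  have hBA : countB e = countA e := by
    rw [← Array.toArray_toList (xs := countB e), ← Array.toArray_toList (xs := countA e),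
      countA_toList, countB_toList, countsL_eq e he]
  have hAL : countA e = (countAL e).toArray := by
    rw [← Array.toArray_toList (xs := countA e), countA_toList]
  rw [hBA, hAL]
  lift e to Nat using he with E
  unfold dpA bestB
  rcases Nat.eq_zero_or_pos E with rfl | hE
  · rw [PySem.List.pyRange_neg_one_eq_nil (by norm_num),
      PySem.List.pyRange_neg_one_eq_nil (by norm_num)]
    rfl
  · have hcast1 : ((E:Int)+1).toNat = E + 1 := by omega
    have hcast2 : ((E:Int)).toNat = E := by omega
    have hinit : (Array.replicate (((E:Int))+1).toNat (0:Int)).setIfInBounds ((E:Int)).toNat (E:Int)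
        = (stA (countAL (E:Int)) E (E-1)).toArray := by
      rw [replicate_toArray, toArray_set]
      apply congrArg List.toArray
      rw [hcast1, hcast2]
      apply List.ext_getElem
        (by rw [List.length_set, List.length_replicate, stA_length])
      intro n hn1 hn2
      have hnE : n < E + 1 := by
        rw [List.length_set, List.length_replicate] at hn1; exact hn1
      rw [List.getElem_set, stA_getElem _ E (E-1) n hnE]
      by_cases hEn : E = n
      · subst hEn
        rw [if_pos rfl, if_pos (by omega), show E - E = 0 from by omega]
        rfl
      · rw [if_neg hEn, List.getElem_replicate, if_neg (by omega)]
    have hrange : PySem.List.pyRange ((E:Int)) 0 (-1)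
        = (E:Int) :: PySem.List.pyRange ((E:Int)-1) 0 (-1) :=
      PySem.List.pyRange_neg_one_cons (by omega)
    rw [hrange, List.foldl_cons]
    have hself : (if (countAL (E:Int)).toArray.getD ((E:Int)).toNat 0 ≥
          (countAL (E:Int)).toArray.getD ((E:Int)).toNat 0 then (E:Int) else (E:Int)) = (E:Int) :=
      ite_self _
    simp only [hself, hinit]
    have hcast3 : ((E:Int)-1) = (((E-1 : Nat)) : Int) := by omega
    rw [hcast3]
    have hsb : (E:Int) = ((sb (countAL (E:Int)) E (E - ((E-1)+1)) : Nat) : Int) := by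
      rw [show E - ((E-1)+1) = 0 from by omega]
      rfl
    calc (((PySem.List.pyRange (((E-1:Nat)) : Int) 0 (-1)).foldl
            (fun (st : Array Int × Int) i =>
              let b := if (countAL (E:Int)).toArray.getD i.toNat 0 ≥
                  (countAL (E:Int)).toArray.getD st.2.toNat 0 then i else st.2
              (st.1.setIfInBounds i.toNat b, b))
            ((stA (countAL (E:Int)) E (E-1)).toArray, (E:Int))).1)
        = (((PySem.List.pyRange (((E-1:Nat)) : Int) 0 (-1)).foldl
            (fun (st : Array Int × Int) i =>
              let b := if (countAL (E:Int)).toArray.getD i.toNat 0 ≥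
                  (countAL (E:Int)).toArray.getD st.2.toNat 0 then i else st.2
              (st.1.setIfInBounds i.toNat b, b))
            ((stA (countAL (E:Int)) E (E-1)).toArray,
              ((sb (countAL (E:Int)) E (E - ((E-1)+1)) : Nat) : Int))).1) := by rw [← hsb]
      _ = (stA (countAL (E:Int)) E 0).toArray :=
          bestB_loop (countAL (E:Int)) E hE (E-1) (by omega)
      _ = ((PySem.List.pyRange (((E-1:Nat)) : Int) 0 (-1)).foldl
            (fun dp i => dp.setIfInBounds i.toNat
              (if (countAL (E:Int)).toArray.getD i.toNat 0 ≥
                  (countAL (E:Int)).toArray.getD (dp.getD (i+1).toNat 0).toNat 0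
               then i else dp.getD (i+1).toNat 0))
            ((stA (countAL (E:Int)) E (E-1)).toArray)) :=
          (dpA_loop (countAL (E:Int)) E hE (E-1) (by omega)).symm

-- ===== VERDICT (by name: the statement is the Claim_ definition above) =====
theorem solution_spec : Claim_equal_solution := by
  intro e starts _ hpre
  unfold Spec_solution solution solution_alt
  rw [dp_eq e hpre.1]
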